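-- pv_equiv track=rewrite | github.com/irfan-sec/InvestiGUI | reporting.py | _identify_immediate_actions
-- ===== SOURCE A (Python) =====
-- from typing import List, Dict, Optional
--
-- def _identify_immediate_actions(timeline_data: List[Dict]) -> List[str]:
--     """Identify immediate actions required."""
--     actions = []
--
--     critical_events = [e for e in timeline_data if e.get('severity') == 'Critical']
--     if critical_events:
--         actions.append("Immediate investigation of critical security events")
--
--     high_events = [e for e in timeline_data if e.get('severity') == 'High']
--     if len(high_events) > 5:
--         actions.append("Review and triage high-priority events")
--
--     if not actions:
--         actions.append("Continue monitoring and maintain current security posture")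
--
--     return actions
-- ===== SOURCE B (Python) =====
-- def _identify_immediate_actions(timeline_data):
--     """Identify immediate actions required.
--
--     Single short-circuiting pass: walk the events once, tracking whether a
--     Critical event was seen and how many High events, and stop scanning as
--     soon as both action conditions are already settled (a Critical seen and
--     more than 5 Highs counted); then assemble the action list from the flags.
--     """
--     has_critical = False
--     high_count = 0
--     for e in timeline_data:
--         s = e.get('severity')
--         if s == 'Critical':
--             has_critical = True
--         elif s == 'High':
--             high_count += 1
--         if has_critical and high_count > 5:
--             break
--     actions = ((["Immediate investigation of critical security events"] if has_critical else [])
--                + (["Review and triage high-priority events"] if high_count > 5 else []))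
--     return actions or ["Continue monitoring and maintain current security posture"]
-- ===== Notes on version B (the rewrite author's own statement) =====
-- stated objective: alternative
-- what changed: Replaces A's two full filtering scans (materializing the matching event lists) with one short-circuiting pass over the events that accumulates a seen-Critical flag and a High counter and stops early once both action conditions are settled, assembling the result from the flags.
import Mathlib
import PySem

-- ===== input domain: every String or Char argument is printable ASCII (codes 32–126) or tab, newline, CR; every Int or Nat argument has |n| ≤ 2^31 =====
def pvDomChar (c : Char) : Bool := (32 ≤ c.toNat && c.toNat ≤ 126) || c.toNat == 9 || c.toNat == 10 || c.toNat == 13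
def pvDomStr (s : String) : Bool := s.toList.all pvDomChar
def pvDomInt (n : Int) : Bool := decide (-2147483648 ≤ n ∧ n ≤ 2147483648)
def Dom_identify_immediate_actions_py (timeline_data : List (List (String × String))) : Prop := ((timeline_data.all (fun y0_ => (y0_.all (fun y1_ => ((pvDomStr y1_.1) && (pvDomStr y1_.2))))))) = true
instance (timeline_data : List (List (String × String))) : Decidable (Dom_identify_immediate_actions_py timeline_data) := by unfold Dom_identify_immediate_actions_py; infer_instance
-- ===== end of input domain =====

-- B replaces A's two full filtering scans with one short-circuiting pass accumulating a flag and a counter; alternative structure, same asymptotic cost.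

-- ===== PORT A =====
-- e.get('severity') : first-match lookup in the event dict (shared by both ports)
def pvSev (e : List (String × String)) : Option String := (PySem.Dict.ofList e).get? "severity"

def identify_immediate_actions_py (timeline_data : List (List (String × String))) : List String :=
  let actions : List String := []
  let critical_events := timeline_data.filter (fun e => pvSev e == some "Critical")
  let actions := if critical_events.isEmpty then actions
                 else actions ++ ["Immediate investigation of critical security events"]
  let high_events := timeline_data.filter (fun e => pvSev e == some "High")
  let actions := if high_events.length > 5 then actions ++ ["Review and triage high-priority events"]
                 else actions
  if actions.isEmpty then actions ++ ["Continue monitoring and maintain current security posture"]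
  else actions

-- ===== PORT B =====
-- the loop of Source B: walk the events accumulating (has_critical, high_count), break once both conditions are settled
def pvScan : List (List (String × String)) → Bool → Int → Bool × Int
  | [], c, h => (c, h)
  | e :: rest, c, h =>
    let s := pvSev e
    let c' := if s == some "Critical" then true else c
    let h' := if s == some "Critical" then h else if s == some "High" then h + 1 else h
    if c' && h' > 5 then (c', h') else pvScan rest c' h'

def identify_immediate_actions_py_alt (timeline_data : List (List (String × String))) : List String :=
  let r := pvScan timeline_data false 0
  let actions := (if r.1 then ["Immediate investigation of critical security events"] else [])
                 ++ (if r.2 > 5 then ["Review and triage high-priority events"] else [])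
  if actions.isEmpty then ["Continue monitoring and maintain current security posture"] else actions

-- ===== PRECONDITION & SPEC =====
def Spec_identify_immediate_actions_py (timeline_data : List (List (String × String))) (out : List String) : Prop := out = identify_immediate_actions_py_alt timeline_data
instance (timeline_data : List (List (String × String))) (out : List String) : Decidable (Spec_identify_immediate_actions_py timeline_data out) := by unfold Spec_identify_immediate_actions_py; infer_instance

-- ===== CLAIM (what is proved, stated in full; the proofs are below) =====
def Claim_equal_identify_immediate_actions_py : Prop := ∀ (timeline_data : List (List (String × String))), Dom_identify_immediate_actions_py timeline_data → Spec_identify_immediate_actions_py timeline_data (identify_immediate_actions_py timeline_data)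

-- ===== LEMMAS AND PROOFS =====

-- The two outcomes of the scan (Critical seen; more than 5 Highs) agree with the
-- full counts even when the loop breaks early.
theorem pv_scan_spec (td : List (List (String × String))) (c : Bool) (h : Int) :
    ((pvScan td c h).1 = (c || decide (0 < td.countP (fun e => pvSev e == some "Critical")))) ∧
    (((pvScan td c h).2 > 5) ↔ (h + (td.countP (fun e => pvSev e == some "High") : Int) > 5)) := by
  induction td generalizing c h with
  | nil => simp [pvScan]
  | cons e rest ih =>
    by_cases hc : pvSev e = some "Critical"
    · have hc' : (pvSev e == some "Critical") = true := by simp [hc]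
      have hh' : (pvSev e == some "High") = false := by simp [hc]
      have cC : (e :: rest).countP (fun x => pvSev x == some "Critical")
          = rest.countP (fun x => pvSev x == some "Critical") + 1 := by
        simp [hc']
      have cH : (e :: rest).countP (fun x => pvSev x == some "High")
          = rest.countP (fun x => pvSev x == some "High") := by
        simp [hh']
      simp only [pvScan, hc', if_true, Bool.true_and, cC, cH]
      by_cases hb : (5:Int) < h
      · simp only [hb, decide_true, if_true]
        exact ⟨by simp, iff_of_true trivial (by omega)⟩
      · simp only [hb, decide_false, Bool.false_eq_true, if_false]
        obtain ⟨ih1, ih2⟩ := ih true h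
        exact ⟨by simp [ih1], ih2⟩
    · have hc' : (pvSev e == some "Critical") = false := by simp [hc]
      have cC : (e :: rest).countP (fun x => pvSev x == some "Critical")
          = rest.countP (fun x => pvSev x == some "Critical") := by
        simp [hc']
      by_cases hh : pvSev e = some "High"
      · have hh' : (pvSev e == some "High") = true := by simp [hh]
        have cH : (e :: rest).countP (fun x => pvSev x == some "High")
            = rest.countP (fun x => pvSev x == some "High") + 1 := by
          simp [hh']
        simp only [pvScan, hc', hh', Bool.false_eq_true, if_false, if_true, cC, cH]
        by_cases hb : (c && decide (h + 1 > 5)) = true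
        · obtain ⟨hb1, hb2⟩ := Bool.and_eq_true_iff.mp hb
          have hb2' : h + 1 > 5 := of_decide_eq_true hb2
          rw [if_pos hb]
          exact ⟨by simp [hb1], iff_of_true hb2' (by push_cast; omega)⟩
        · rw [if_neg hb]
          obtain ⟨ih1, ih2⟩ := ih c (h + 1)
          refine ⟨ih1, ?_⟩
          rw [ih2]; push_cast; constructor <;> intro <;> omega
      · have hh' : (pvSev e == some "High") = false := by simp [hh]
        have cH : (e :: rest).countP (fun x => pvSev x == some "High")
            = rest.countP (fun x => pvSev x == some "High") := by
          simp [hh']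
        simp only [pvScan, hc', hh', Bool.false_eq_true, if_false, cC, cH]
        by_cases hb : (c && decide (h > 5)) = true
        · obtain ⟨hb1, hb2⟩ := Bool.and_eq_true_iff.mp hb
          have hb2' : h > 5 := of_decide_eq_true hb2
          rw [if_pos hb]
          exact ⟨by simp [hb1], iff_of_true hb2' (by omega)⟩
        · rw [if_neg hb]
          exact ih c h

-- ===== VERDICT (by name: the statement is the Claim_ definition above) =====
theorem identify_immediate_actions_py_spec : Claim_equal_identify_immediate_actions_py := by
  intro td _
  show identify_immediate_actions_py td = identify_immediate_actions_py_alt td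
  obtain ⟨h1, h2⟩ := pv_scan_spec td false 0
  simp only [Bool.false_or] at h1
  rw [zero_add] at h2
  unfold identify_immediate_actions_py identify_immediate_actions_py_alt
  have lenc : (td.filter (fun e => pvSev e == some "Critical")).length
      = td.countP (fun e => pvSev e == some "Critical") :=
    List.countP_eq_length_filter.symm
  have lenh : (td.filter (fun e => pvSev e == some "High")).length
      = td.countP (fun e => pvSev e == some "High") :=
    List.countP_eq_length_filter.symm
  have hA : (td.filter (fun e => pvSev e == some "Critical")).isEmpty
      = decide (td.countP (fun e => pvSev e == some "Critical") = 0) := by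
    rw [← lenc]; cases td.filter (fun e => pvSev e == some "Critical") <;> simp
  have h2' : ((pvScan td false 0).2 > 5) ↔ (td.countP (fun e => pvSev e == some "High") > 5) := by
    rw [h2]; exact_mod_cast Iff.rfl
  by_cases hcrit : td.countP (fun e => pvSev e == some "Critical") = 0 <;>
  by_cases hp : (pvScan td false 0).2 > 5
  · have hhigh := h2'.mp hp
    simp [hA, lenh, h1, hcrit, hp, hhigh]
  · have hhigh : ¬ td.countP (fun e => pvSev e == some "High") > 5 := fun x => hp (h2'.mpr x)
    simp [hA, lenh, h1, hcrit, hp, hhigh]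
  · have hcp : 0 < td.countP (fun e => pvSev e == some "Critical") := Nat.pos_of_ne_zero hcrit
    have hhigh := h2'.mp hp
    have hex : ∃ a ∈ td, pvSev a = some "Critical" := by
      simpa using List.countP_pos_iff.mp hcp
    simp [hA, lenh, h1, hcrit, hp, hhigh, hex]
  · have hcp : 0 < td.countP (fun e => pvSev e == some "Critical") := Nat.pos_of_ne_zero hcrit
    have hhigh : ¬ td.countP (fun e => pvSev e == some "High") > 5 := fun x => hp (h2'.mpr x)
    have hex : ∃ a ∈ td, pvSev a = some "Critical" := by
      simpa using List.countP_pos_iff.mp hcp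
    simp [hA, lenh, h1, hcrit, hp, hhigh, hex]
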